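-- pv_equiv track=rewrite | github.com/achiyane/ParserADSSDTO | Parser.py | changeDAO2
-- ===== SOURCE A (Python) =====
-- s = ""
--
-- backend_dal = "DataAccessLayer"
--
-- def changeDAO2(code, className):
--     lst = code.split("\n")
--     fin = ""
--     im = f"import {backend_dal}.DataAccess.DTOs.{s}DTOS.{className}DTO;\n"
--     isIm = f"import {backend_dal}.DataAccess.DTOs.{s}DTOS.{className}" in code
--     for i in range(len(lst)):
--         a = lst[i]
--         d = a.replace(" ", "")
--         if not isIm and "import" in a:
--             isIm = True
--             fin += a + "\n" + im
--         elif "newPK" in d: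
--             ind = a.index("new PK(")
--             t = a
--             ind1 = t.replace("()", "##").index(")")
--             f = a[int(ind + 7):ind1].split(",")
--             args = f"{f[len(f) - 1]}"
--             for j in range(len(f) - 1):
--                 args += f", {f[j]}"
--             fin += f'{a[0: int(ind + 7)]}{args}{a[int(ind1): len(a)]}\n'
--         else:
--             fin += a + "\n"
--     return changeDAO3(fin)
--
-- def changeDAO3(code):
--     lst = code.split("\n")
--     fin = ""
--     for i in range(len(lst)):
--         a = lst[i]
--         d = a.replace(" ", "")
--         if "super" in d:
--             c = "getIdentityMap("
--             if c in d:
--                 changed = a.split(c)[1]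
--                 idx = a.index(c) + len(c)
--                 n = changed.split(",")[1].strip()
--                 fin += f'{a[0:idx]}{n}\n'
--         else:
--             fin += f'{a}\n'
--     return fin
-- ===== SOURCE B (Python) =====
-- s = ""
--
-- backend_dal = "DataAccessLayer"
--
-- _C = "getIdentityMap("
--
--
-- def _rotate_pk(a):
--     # rotate the arguments of the first `new PK(...)` call: last arg first
--     ind = a.index("new PK(")
--     ind1 = a.replace("()", "##").index(")")
--     parts = a[ind + 7:ind1].split(",")
--     rotated = ", ".join(parts[-1:] + parts[:-1])
--     return a[:ind + 7] + rotated + a[ind1:]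
--
--
-- def _super_fix(a):
--     # returns the rewritten line, or None when the line is dropped
--     d = a.replace(" ", "")
--     if "super" not in d:
--         return a
--     if _C not in d:
--         return None
--     head = a[:a.index(_C) + len(_C)]
--     return head + a.split(_C)[1].split(",")[1].strip()
--
--
-- def changeDAO2(code, className):
--     im = f"import {backend_dal}.DataAccess.DTOs.{s}DTOS.{className}DTO;"
--     isIm = f"import {backend_dal}.DataAccess.DTOs.{s}DTOS.{className}" in code
--     out = []
--     for a in code.split("\n"):
--         if not isIm and "import" in a:
--             isIm = True
--             pieces = [a] + im.split("\n")
--         elif "newPK" in a.replace(" ", ""):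
--             pieces = [_rotate_pk(a)]
--         else:
--             pieces = [a]
--         for p in pieces:
--             w = _super_fix(p)
--             if w is not None:
--                 out.append(w + "\n")
--     out.append("\n")
--     return "".join(out)
-- ===== Notes on version B (the rewrite author's own statement) =====
-- stated objective: alternative
-- what changed: B fuses A's two passes into one loop over the original lines: each line produces its pieces (line, line+inserted-import line, or PK-rotated line, with the rotation built by ', '.join of a rotated parts list instead of A's index loop), and the super/getIdentityMap stage is applied to each piece immediately, so no intermediate string is joined and re-split.
import Mathlib
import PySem

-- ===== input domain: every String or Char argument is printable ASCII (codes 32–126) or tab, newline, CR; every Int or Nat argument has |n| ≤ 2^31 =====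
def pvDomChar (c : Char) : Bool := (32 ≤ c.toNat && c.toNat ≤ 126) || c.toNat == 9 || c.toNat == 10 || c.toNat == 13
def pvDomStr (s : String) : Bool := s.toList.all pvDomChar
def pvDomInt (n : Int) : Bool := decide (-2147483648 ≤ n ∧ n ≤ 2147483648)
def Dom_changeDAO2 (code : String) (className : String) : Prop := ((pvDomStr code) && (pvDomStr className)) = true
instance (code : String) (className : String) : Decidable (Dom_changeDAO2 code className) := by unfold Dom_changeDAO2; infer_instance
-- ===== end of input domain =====

-- B fuses A's two passes (rewrite + join + re-split + super-pass) into one pass over the original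
-- lines, applying the super/getIdentityMap stage to each produced piece directly (objective: alternative).


-- ===== PORT A =====
-- helper of A: changeDAO3 (same module), line-wise super/getIdentityMap rewrite
def changeDAO3 (code : String) : String :=
  let lst := PySem.Chars.splitOn code.toList "\n".toList
  let fin := (PySem.List.pyRange 0 (lst.length : Int) 1).foldl (fun (fin : List Char) i =>
    let a := PySem.List.pyGetD lst i []
    let d := PySem.Chars.replace a " ".toList "".toList
    if PySem.Chars.isIn "super".toList d then
      let c := "getIdentityMap(".toList
      if PySem.Chars.isIn c d then
        let changed := PySem.List.pyGetD (PySem.Chars.splitOn a c) 1 []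
        let idx := PySem.Chars.find a c + (c.length : Int)
        let n := PySem.Chars.strip (PySem.List.pyGetD (PySem.Chars.splitOn changed ",".toList) 1 [])
        fin ++ PySem.Chars.slice a (some 0) (some idx) ++ n ++ "\n".toList
      else fin
    else fin ++ a ++ "\n".toList) []
  String.ofList fin

def changeDAO2 (code : String) (className : String) : String :=
  let lst := PySem.Chars.splitOn code.toList "\n".toList
  let im := "import DataAccessLayer.DataAccess.DTOs.DTOS.".toList ++ className.toList ++ "DTO;\n".toList
  let isIm0 := PySem.Chars.isIn ("import DataAccessLayer.DataAccess.DTOs.DTOS.".toList ++ className.toList) code.toList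
  let r := (PySem.List.pyRange 0 (lst.length : Int) 1).foldl (fun (st : Bool × List Char) i =>
    let a := PySem.List.pyGetD lst i []
    let d := PySem.Chars.replace a " ".toList "".toList
    if !st.1 && PySem.Chars.isIn "import".toList a then
      (true, st.2 ++ a ++ "\n".toList ++ im)
    else if PySem.Chars.isIn "newPK".toList d then
      -- a.index("new PK(") / .index(")") raise outside Pre_: the port continues with find's -1 there
      let ind := PySem.Chars.find a "new PK(".toList
      let ind1 := PySem.Chars.find (PySem.Chars.replace a "()".toList "##".toList) ")".toList
      let f := PySem.Chars.splitOn (PySem.Chars.slice a (some (ind + 7)) (some ind1)) ",".toList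
      let args := (PySem.List.pyRange 0 ((f.length : Int) - 1) 1).foldl
        (fun args j => args ++ ", ".toList ++ PySem.List.pyGetD f j []) (PySem.List.pyGetD f ((f.length : Int) - 1) [])
      (st.1, st.2 ++ PySem.Chars.slice a (some 0) (some (ind + 7)) ++ args ++ PySem.Chars.slice a (some ind1) (some (a.length : Int)) ++ "\n".toList)
    else
      (st.1, st.2 ++ a ++ "\n".toList)) (isIm0, [])
  changeDAO3 (String.ofList r.2)

-- ===== PORT B =====
-- B helper: rotate the arguments of the first `new PK(...)` call (last argument first)
def pvRotatePK (a : List Char) : List Char :=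
  let ind := PySem.Chars.find a "new PK(".toList
  let ind1 := PySem.Chars.find (PySem.Chars.replace a "()".toList "##".toList) ")".toList
  let parts := PySem.Chars.splitOn (PySem.Chars.slice a (some (ind + 7)) (some ind1)) ",".toList
  let rotated := PySem.Chars.join ", ".toList
    (PySem.List.slice parts (some (-1)) none ++ PySem.List.slice parts none (some (-1)))
  PySem.Chars.slice a none (some (ind + 7)) ++ rotated ++ PySem.Chars.slice a (some ind1) none

-- B helper: the super/getIdentityMap rewrite of one line; none = line dropped
def pvSuperFix (a : List Char) : Option (List Char) :=
  let d := PySem.Chars.replace a " ".toList "".toList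
  if !(PySem.Chars.isIn "super".toList d) then some a
  else if !(PySem.Chars.isIn "getIdentityMap(".toList d) then none
  else
    let c := "getIdentityMap(".toList
    let head := PySem.Chars.slice a none (some (PySem.Chars.find a c + (c.length : Int)))
    some (head ++ PySem.Chars.strip (PySem.List.pyGetD (PySem.Chars.splitOn
      (PySem.List.pyGetD (PySem.Chars.splitOn a c) 1 []) ",".toList) 1 []))

def changeDAO2_alt (code : String) (className : String) : String :=
  let im := "import DataAccessLayer.DataAccess.DTOs.DTOS.".toList ++ className.toList ++ "DTO;".toList
  let isIm0 := PySem.Chars.isIn ("import DataAccessLayer.DataAccess.DTOs.DTOS.".toList ++ className.toList) code.toList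
  let r := (PySem.Chars.splitOn code.toList "\n".toList).foldl (fun (st : Bool × List (List Char)) a =>
    let pcs : Bool × List (List Char) :=
      if !st.1 && PySem.Chars.isIn "import".toList a then
        (true, a :: PySem.Chars.splitOn im "\n".toList)
      else if PySem.Chars.isIn "newPK".toList (PySem.Chars.replace a " ".toList "".toList) then
        (st.1, [pvRotatePK a])
      else (st.1, [a])
    (pcs.1, pcs.2.foldl (fun out p =>
      match pvSuperFix p with
      | some w => out ++ [w ++ "\n".toList]
      | none => out) st.2)) (isIm0, [])
  String.ofList (PySem.Chars.join [] (r.2 ++ ["\n".toList]))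

-- ===== PRECONDITION & SPEC =====
-- Pre_-side helper: the super stage of A does not raise on line p
def pvSuperOK (p : List Char) : Bool :=
  let d := PySem.Chars.replace p " ".toList "".toList
  !(PySem.Chars.isIn "super".toList d && PySem.Chars.isIn "getIdentityMap(".toList d)
  || (PySem.Chars.isIn "getIdentityMap(".toList p &&
      PySem.Chars.isIn ",".toList (PySem.List.pyGetD (PySem.Chars.splitOn p "getIdentityMap(".toList) 1 []))

-- Pre_-side helper: A's `new PK(` / `)` lookups succeed on line a
def pvNewPKOK (a : List Char) : Bool :=
  PySem.Chars.isIn "new PK(".toList a &&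
  PySem.Chars.isIn ")".toList (PySem.Chars.replace a "()".toList "##".toList)

-- Pre_ excludes EXACTLY the inputs on which A raises (ValueError from .index when a `newPK` line
-- lacks a literal "new PK(" or a usable ")", IndexError/ValueError in the super stage when a
-- produced line — an original line, the inserted import line, or the PK-rotated line — contains
-- "super" and "getIdentityMap(" after space-removal but "getIdentityMap(" is not literally present
-- or no comma follows it); on every input A returns on, Pre_ holds.
def Pre_changeDAO2 (code : String) (className : String) : Prop :=
  ∀ i, i < (PySem.Chars.splitOn code.toList "\n".toList).length →
    (let lines := PySem.Chars.splitOn code.toList "\n".toList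
     let a := lines.getD i []
     if (!(PySem.Chars.isIn ("import DataAccessLayer.DataAccess.DTOs.DTOS.".toList ++ className.toList) code.toList)
         && PySem.Chars.isIn "import".toList a
         && decide (∀ j, j < i → PySem.Chars.isIn "import".toList (lines.getD j []) = false)) then
       pvSuperOK a && pvSuperOK ("import DataAccessLayer.DataAccess.DTOs.DTOS.".toList ++ className.toList ++ "DTO;".toList)
     else if PySem.Chars.isIn "newPK".toList (PySem.Chars.replace a " ".toList "".toList) then
       pvNewPKOK a && pvSuperOK (pvRotatePK a)
     else pvSuperOK a) = true
instance (code : String) (className : String) : Decidable (Pre_changeDAO2 code className) := by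
  unfold Pre_changeDAO2; infer_instance

def pvWitness_changeDAO2 : String × String := ("int x;", "Foo")

def Spec_changeDAO2 (code : String) (className : String) (out : String) : Prop := out = changeDAO2_alt code className
instance (code : String) (className : String) (out : String) : Decidable (Spec_changeDAO2 code className out) := by unfold Spec_changeDAO2; infer_instance

-- ===== CLAIM (what is proved, stated in full; the proofs are below) =====
def Claim_equal_changeDAO2 : Prop := ∀ (code : String) (className : String), Dom_changeDAO2 code className → Pre_changeDAO2 code className → Spec_changeDAO2 code className (changeDAO2 code className)

-- ===== LEMMAS AND PROOFS =====

theorem nl_eq : "\n".toList = ['\n'] := rfl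

theorem comma_eq : ",".toList = [','] := rfl

-- structural model of s.split(c) for a one-character separator
def charSplit (c : Char) : List Char → List (List Char)
  | [] => [[]]
  | b :: t => if b = c then [] :: charSplit c t else (charSplit c t).modifyHead (b :: ·)

theorem charSplit_ne_nil (c : Char) (s : List Char) : charSplit c s ≠ [] := by
  induction s with
  | nil => simp [charSplit]
  | cons b t ih =>
    simp only [charSplit]
    split
    · simp
    · cases h : charSplit c t with
      | nil => exact absurd h ih
      | cons p ps => simp [List.modifyHead]

theorem splitOn_go_one (c : Char) : ∀ (fuel : Nat) (l cur : List Char) (acc : List (List Char)),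
    l.length < fuel →
    PySem.Chars.splitOn.go [c] fuel l cur acc
      = acc.reverse ++ (charSplit c l).modifyHead (cur.reverse ++ ·) := by
  intro fuel
  induction fuel with
  | zero => intro l cur acc h; omega
  | succ n ih =>
    intro l cur acc h
    cases l with
    | nil => simp [PySem.Chars.splitOn.go, charSplit, List.modifyHead]
    | cons b t =>
      rw [PySem.Chars.splitOn.go]
      by_cases hb : b = c
      · subst hb
        have hpre : [b].isPrefixOf (b :: t) = true := by simp [List.isPrefixOf]
        simp only [hpre, if_true, List.length_cons, List.length_nil, List.drop_succ_cons, List.drop_zero]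
        rw [ih t [] (cur.reverse :: acc) (by simpa using Nat.lt_of_succ_lt_succ h)]
        cases hcs : charSplit b t with
        | nil => exact absurd hcs (charSplit_ne_nil b t)
        | cons p ps =>
          simp [charSplit, hcs, List.modifyHead]
      · have hpre : [c].isPrefixOf (b :: t) = false := by
          simp [List.isPrefixOf]
          intro hcb; exact absurd hcb.symm hb
        rw [if_neg (by simp [hpre])]
        rw [ih t (b :: cur) acc (by simpa using Nat.lt_of_succ_lt_succ h)]
        cases hcs : charSplit c t with
        | nil => exact absurd hcs (charSplit_ne_nil c t)
        | cons p ps =>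
          simp [charSplit, hcs, if_neg hb, List.modifyHead]

theorem splitOn_eq_charSplit (c : Char) (s : List Char) :
    PySem.Chars.splitOn s [c] = charSplit c s := by
  unfold PySem.Chars.splitOn
  rw [splitOn_go_one c (s.length + 1) s [] [] (by omega)]
  cases hcs : charSplit c s with
  | nil => exact absurd hcs (charSplit_ne_nil c s)
  | cons p ps => simp [List.modifyHead]

theorem notMem_of_mem_charSplit {c : Char} {s p : List Char} (h : p ∈ charSplit c s) : c ∉ p := by
  induction s generalizing p with
  | nil => simp [charSplit] at h; simp [h]
  | cons b t ih =>
    simp only [charSplit] at h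
    split at h
    · rcases List.mem_cons.1 h with h1 | h1
      · simp [h1]
      · exact ih h1
    · rename_i hb
      cases hcs : charSplit c t with
      | nil => exact absurd hcs (charSplit_ne_nil c t)
      | cons q qs =>
        rw [hcs, List.modifyHead] at h
        rcases List.mem_cons.1 h with h1 | h1
        · subst h1
          intro hm
          rcases List.mem_cons.1 hm with h2 | h2
          · exact hb h2.symm
          · exact ih (hcs ▸ List.mem_cons_self) h2
        · exact ih (hcs ▸ List.mem_cons.2 (Or.inr h1))

theorem mem_of_mem_charSplit {c x : Char} {s p : List Char} (hp : p ∈ charSplit c s) (hx : x ∈ p) :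
    x ∈ s := by
  induction s generalizing p with
  | nil => simp [charSplit] at hp; subst hp; simp at hx
  | cons b t ih =>
    simp only [charSplit] at hp
    split at hp
    · rcases List.mem_cons.1 hp with h1 | h1
      · subst h1; simp at hx
      · exact List.mem_cons.2 (Or.inr (ih h1 hx))
    · cases hcs : charSplit c t with
      | nil => exact absurd hcs (charSplit_ne_nil c t)
      | cons q qs =>
        rw [hcs, List.modifyHead] at hp
        rcases List.mem_cons.1 hp with h1 | h1
        · subst h1
          rcases List.mem_cons.1 hx with h2 | h2
          · exact List.mem_cons.2 (Or.inl h2)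
          · exact List.mem_cons.2 (Or.inr (ih (hcs ▸ List.mem_cons_self) h2))
        · exact List.mem_cons.2 (Or.inr (ih (hcs ▸ List.mem_cons.2 (Or.inr h1)) hx))

theorem charSplit_append_sep {c : Char} {u : List Char} (hu : c ∉ u) (y : List Char) :
    charSplit c (u ++ c :: y) = u :: charSplit c y := by
  induction u with
  | nil => simp [charSplit]
  | cons b t ih =>
    have hb : b ≠ c := fun h => hu (h ▸ List.mem_cons_self)
    simp only [List.cons_append, charSplit, if_neg hb,
      ih (fun h => hu (List.mem_cons.2 (Or.inr h))), List.modifyHead]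

theorem flatMap_charSplit (c : Char) (s : List Char) :
    (charSplit c s).flatMap (· ++ [c]) = s ++ [c] := by
  induction s with
  | nil => simp [charSplit]
  | cons b t ih =>
    simp only [charSplit]
    split
    · rename_i hb; subst hb; simp [ih]
    · cases hcs : charSplit c t with
      | nil => exact absurd hcs (charSplit_ne_nil c t)
      | cons q qs =>
        rw [hcs] at ih
        simp only [List.modifyHead, List.flatMap_cons] at ih ⊢
        simp [ih]

theorem charSplit_units {c : Char} {ls : List (List Char)} (h : ∀ u ∈ ls, c ∉ u) :
    charSplit c (ls.flatMap (· ++ [c])) = ls ++ [[]] := by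
  induction ls with
  | nil => simp [charSplit]
  | cons u us ih =>
    simp only [List.flatMap_cons, List.append_assoc, List.singleton_append]
    rw [charSplit_append_sep (h u List.mem_cons_self)]
    rw [ih (fun v hv => h v (List.mem_cons.2 (Or.inr hv)))]
    simp

-- the emission of B's super stage on one produced line
def emitOf (p : List Char) : List (List Char) :=
  match pvSuperFix p with
  | some w => [w ++ "\n".toList]
  | none => []

-- B's per-line piece production
def chunkOf (im : List Char) (b : Bool) (a : List Char) : Bool × List (List Char) :=
  if !b && PySem.Chars.isIn "import".toList a then (true, a :: charSplit '\n' im)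
  else if PySem.Chars.isIn "newPK".toList (PySem.Chars.replace a " ".toList "".toList) then (b, [pvRotatePK a])
  else (b, [a])

def unitsOf (im : List Char) : Bool → List (List Char) → List (List Char)
  | _, [] => []
  | b, a :: t => (chunkOf im b a).2 ++ unitsOf im (chunkOf im b a).1 t

def finalIm (im : List Char) : Bool → List (List Char) → Bool
  | b, [] => b
  | b, a :: t => finalIm im (chunkOf im b a).1 t

-- A's stage-1 loop body and changeDAO3's loop body, named (let-free) for the proofs
def stepA1 (im : List Char) (st : Bool × List Char) (a : List Char) : Bool × List Char :=
  if !st.1 && PySem.Chars.isIn "import".toList a then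
    (true, st.2 ++ a ++ "\n".toList ++ im)
  else if PySem.Chars.isIn "newPK".toList (PySem.Chars.replace a " ".toList "".toList) then
    (st.1, st.2 ++
      PySem.Chars.slice a (some 0) (some (PySem.Chars.find a "new PK(".toList + 7)) ++
      ((PySem.List.pyRange 0 (((PySem.Chars.splitOn (PySem.Chars.slice a (some (PySem.Chars.find a "new PK(".toList + 7)) (some (PySem.Chars.find (PySem.Chars.replace a "()".toList "##".toList) ")".toList))) ",".toList).length : Int) - 1) 1).foldl
        (fun args j => args ++ ", ".toList ++ PySem.List.pyGetD (PySem.Chars.splitOn (PySem.Chars.slice a (some (PySem.Chars.find a "new PK(".toList + 7)) (some (PySem.Chars.find (PySem.Chars.replace a "()".toList "##".toList) ")".toList))) ",".toList) j [])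
        (PySem.List.pyGetD (PySem.Chars.splitOn (PySem.Chars.slice a (some (PySem.Chars.find a "new PK(".toList + 7)) (some (PySem.Chars.find (PySem.Chars.replace a "()".toList "##".toList) ")".toList))) ",".toList) (((PySem.Chars.splitOn (PySem.Chars.slice a (some (PySem.Chars.find a "new PK(".toList + 7)) (some (PySem.Chars.find (PySem.Chars.replace a "()".toList "##".toList) ")".toList))) ",".toList).length : Int) - 1) [])) ++
      PySem.Chars.slice a (some (PySem.Chars.find (PySem.Chars.replace a "()".toList "##".toList) ")".toList)) (some (a.length : Int)) ++ "\n".toList)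
  else
    (st.1, st.2 ++ a ++ "\n".toList)

def stepA3 (fin : List Char) (a : List Char) : List Char :=
  if PySem.Chars.isIn "super".toList (PySem.Chars.replace a " ".toList "".toList) then
    if PySem.Chars.isIn "getIdentityMap(".toList (PySem.Chars.replace a " ".toList "".toList) then
      fin ++ PySem.Chars.slice a (some 0) (some (PySem.Chars.find a "getIdentityMap(".toList + ("getIdentityMap(".toList.length : Int))) ++
        PySem.Chars.strip (PySem.List.pyGetD (PySem.Chars.splitOn (PySem.List.pyGetD (PySem.Chars.splitOn a "getIdentityMap(".toList) 1 []) ",".toList) 1 []) ++ "\n".toList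
    else fin
  else fin ++ a ++ "\n".toList

def stepB (im : List Char) (st : Bool × List (List Char)) (a : List Char) : Bool × List (List Char) :=
  let pcs : Bool × List (List Char) :=
    if !st.1 && PySem.Chars.isIn "import".toList a then
      (true, a :: PySem.Chars.splitOn im "\n".toList)
    else if PySem.Chars.isIn "newPK".toList (PySem.Chars.replace a " ".toList "".toList) then
      (st.1, [pvRotatePK a])
    else (st.1, [a])
  (pcs.1, pcs.2.foldl (fun out p =>
    match pvSuperFix p with
    | some w => out ++ [w ++ "\n".toList]
    | none => out) st.2)

theorem drop_length_sub_one_eq {α : Type} (f : List α) (hf : f ≠ []) (d : α) :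
    List.drop (f.length - 1) f = [f.getD (f.length - 1) d] := by
  induction f with
  | nil => simp at hf
  | cons x t ih =>
    cases t with
    | nil => simp
    | cons y u =>
      simpa using ih (by simp)

theorem intercalate_head_flatMap {α : Type} (sep x : List α) (xs : List (List α)) :
    List.intercalate sep (x :: xs) = x ++ xs.flatMap (fun p => sep ++ p) := by
  induction xs generalizing x with
  | nil => simp [List.intercalate]
  | cons y ys ih =>
    rw [show List.intercalate sep (x :: y :: ys) = x ++ sep ++ List.intercalate sep (y :: ys) by
      simp [List.intercalate, List.intersperse], ih y]
    simp

theorem map_getD_range {α : Type} (xs : List α) (d : α) (m : Nat) (hm : m ≤ xs.length) :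
    (List.range m).map (fun k => xs.getD k d) = xs.take m := by
  induction m with
  | zero => simp
  | succ n ih =>
    rw [List.range_succ, List.map_append, ih (by omega)]
    have hn : n < xs.length := by omega
    rw [List.take_add_one]
    simp [List.getD, hn]

theorem slice_some_len {α : Type} (xs : List α) (i : Int) :
    PySem.List.slice xs (some i) (some (xs.length : Int)) = PySem.List.slice xs (some i) none := by
  simp [PySem.List.slice]

-- A's hand-rolled argument rotation equals B's join of the rotated pieces
theorem rotation_eq (f : List (List Char)) (hf : f ≠ []) :
    (PySem.List.pyRange 0 ((f.length : Int) - 1) 1).foldl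
      (fun args j => args ++ ", ".toList ++ PySem.List.pyGetD f j []) (PySem.List.pyGetD f ((f.length : Int) - 1) [])
    = PySem.Chars.join ", ".toList
        (PySem.List.slice f (some (-1)) none ++ PySem.List.slice f none (some (-1))) := by
  have hlen : 1 ≤ f.length := List.length_pos_iff.2 hf
  have hcast : ((f.length : Int) - 1) = ((f.length - 1 : Nat) : Int) := by push_cast [hlen]; ring
  rw [PySem.List.slice_from_neg_one, drop_length_sub_one_eq f hf [],
    PySem.List.slice_to_neg_one, List.singleton_append]
  unfold PySem.Chars.join
  rw [intercalate_head_flatMap]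
  simp only [List.append_assoc]
  rw [PySem.List.foldl_append_eq_flatMap]
  rw [hcast]
  simp only [PySem.List.pyGetD_natCast]
  rw [PySem.List.pyRange_zero_nat, List.flatMap_map]
  simp only [PySem.List.pyGetD_natCast]
  have : (List.range (f.length - 1)).flatMap (fun k => ", ".toList ++ f.getD k []) =
      ((List.range (f.length - 1)).map (fun k => f.getD k [])).flatMap (fun p => ", ".toList ++ p) := by
    rw [List.flatMap_map]
  rw [this, map_getD_range f [] (f.length - 1) (by omega), ← List.dropLast_eq_take]

theorem flatten_flatMap_eq {α : Type} (ls : List (List α)) (f : List α → List (List α)) :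
    (ls.flatMap f).flatten = ls.flatMap (fun a => (f a).flatten) := by
  induction ls with
  | nil => simp
  | cons a t ih => simp [ih]

theorem mem_intersperse_cases {α : Type} {x sep : α} {l : List α} (h : x ∈ l.intersperse sep) :
    x ∈ l ∨ x = sep := by
  induction l with
  | nil => simp at h
  | cons a t ih =>
    cases t with
    | nil => simp at h; simp [h]
    | cons b u =>
      rw [show (a :: b :: u).intersperse sep = a :: sep :: (b :: u).intersperse sep from rfl] at h
      rcases List.mem_cons.1 h with h1 | h1
      · exact Or.inl (by simp [h1])
      · rcases List.mem_cons.1 h1 with h2 | h2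
        · exact Or.inr h2
        · rcases ih h2 with h3 | h3
          · exact Or.inl (List.mem_cons.2 (Or.inr h3))
          · exact Or.inr h3

theorem stepA1_eq (im : List Char) (st : Bool × List Char) (a : List Char) :
    stepA1 (im ++ "\n".toList) st a =
      ((chunkOf im st.1 a).1, st.2 ++ (chunkOf im st.1 a).2.flatMap (· ++ "\n".toList)) := by
  unfold stepA1 chunkOf
  by_cases h1 : (!st.1 && PySem.Chars.isIn "import".toList a) = true
  · rw [if_pos h1, if_pos h1]
    simp only [List.flatMap_cons, nl_eq]
    rw [flatMap_charSplit]
    simp [List.append_assoc]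
  · by_cases h2 : PySem.Chars.isIn "newPK".toList (PySem.Chars.replace a " ".toList "".toList) = true
    · rw [if_neg h1, if_neg h1, if_pos h2, if_pos h2]
      have hf : PySem.Chars.splitOn
          (PySem.Chars.slice a (some (PySem.Chars.find a "new PK(".toList + 7))
            (some (PySem.Chars.find (PySem.Chars.replace a "()".toList "##".toList) ")".toList)))
          ",".toList ≠ [] := by
        rw [comma_eq, splitOn_eq_charSplit]
        exact charSplit_ne_nil _ _
      rw [rotation_eq _ hf]
      unfold pvRotatePK
      simp [slice_some_len, List.append_assoc]
    · rw [if_neg h1, if_neg h1, if_neg h2, if_neg h2]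
      simp [List.append_assoc]

theorem stepA3_eq (fin a : List Char) : stepA3 fin a = fin ++ (emitOf a).flatten := by
  unfold stepA3 emitOf pvSuperFix
  cases hs : PySem.Chars.isIn "super".toList (PySem.Chars.replace a " ".toList "".toList) with
  | false => simp at hs; simp [hs, List.append_assoc]
  | true =>
    cases hc : PySem.Chars.isIn "getIdentityMap(".toList (PySem.Chars.replace a " ".toList "".toList) with
    | false => simp at hs hc; simp [hs, hc]
    | true => simp at hs hc; simp [hs, hc, List.append_assoc]

theorem foldA1_eq (im : List Char) (lines : List (List Char)) : ∀ (b : Bool) (fin : List Char),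
    lines.foldl (stepA1 (im ++ "\n".toList)) (b, fin)
      = (finalIm im b lines, fin ++ (unitsOf im b lines).flatMap (· ++ "\n".toList)) := by
  induction lines with
  | nil => intro b fin; simp [unitsOf, finalIm]
  | cons a t ih =>
    intro b fin
    rw [List.foldl_cons, stepA1_eq im (b, fin) a, ih]
    simp [unitsOf, finalIm, List.flatMap_append, List.append_assoc]

theorem emit_fold_eq (ps : List (List Char)) : ∀ (out : List (List Char)),
    ps.foldl (fun out p =>
      match pvSuperFix p with
      | some w => out ++ [w ++ ['\n']]
      | none => out) out = out ++ ps.flatMap emitOf := by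
  induction ps with
  | nil => intro out; simp
  | cons p t ih =>
    intro out
    simp only [List.foldl_cons]
    rw [ih]
    cases hp : pvSuperFix p with
    | some w => simp [emitOf, hp, List.append_assoc]
    | none => simp [emitOf, hp]

theorem emit_one_eq (out : List (List Char)) (p : List Char) :
    (match pvSuperFix p with
     | some w => out ++ [w ++ ['\n']]
     | none => out) = out ++ emitOf p := by
  cases hp : pvSuperFix p <;> simp [emitOf, hp]

theorem stepB_eq (im : List Char) (st : Bool × List (List Char)) (a : List Char) :
    stepB im st a = ((chunkOf im st.1 a).1, st.2 ++ (chunkOf im st.1 a).2.flatMap emitOf) := by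
  unfold stepB chunkOf
  simp only [nl_eq, splitOn_eq_charSplit]
  by_cases h1 : (!st.1 && PySem.Chars.isIn "import".toList a) = true
  · rw [if_pos h1]
    rw [emit_fold_eq]
  · by_cases h2 : PySem.Chars.isIn "newPK".toList (PySem.Chars.replace a " ".toList "".toList) = true
    · rw [if_neg h1, if_pos h2]
      simp only [List.foldl_cons, List.foldl_nil, List.flatMap_cons, List.flatMap_nil]
      rw [emit_one_eq]
      simp
    · rw [if_neg h1, if_neg h2]
      simp only [List.foldl_cons, List.foldl_nil, List.flatMap_cons, List.flatMap_nil]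
      rw [emit_one_eq]
      simp

theorem foldB_eq (im : List Char) (lines : List (List Char)) : ∀ (b : Bool) (out : List (List Char)),
    lines.foldl (stepB im) (b, out)
      = (finalIm im b lines, out ++ (unitsOf im b lines).flatMap emitOf) := by
  induction lines with
  | nil => intro b out; simp [unitsOf, finalIm]
  | cons a t ih =>
    intro b out
    rw [List.foldl_cons, stepB_eq im (b, out) a, ih]
    simp [unitsOf, finalIm, List.flatMap_append, List.append_assoc]

theorem intercalate_nil_eq_flatten {α : Type} (l : List (List α)) :
    List.intercalate ([] : List α) l = l.flatten := by
  induction l with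
  | nil => simp [List.intercalate]
  | cons x xs ih => cases xs <;> simp_all [List.intercalate, List.intersperse]

theorem rotate_nl_free {a : List Char} (h : '\n' ∉ a) : '\n' ∉ pvRotatePK a := by
  unfold pvRotatePK
  intro hm
  rcases List.mem_append.1 hm with h1 | h1
  · rcases List.mem_append.1 h1 with h2 | h2
    · exact h (PySem.List.mem_of_mem_slice _ _ _ (by simpa using h2))
    · unfold PySem.Chars.join at h2
      rw [List.intercalate] at h2
      rcases List.mem_flatten.1 h2 with ⟨p, hp, hxp⟩
      rcases mem_intersperse_cases hp with hp1 | hp1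
      · have hpp : p ∈ PySem.Chars.splitOn (PySem.Chars.slice a
            (some (PySem.Chars.find a "new PK(".toList + 7))
            (some (PySem.Chars.find (PySem.Chars.replace a "()".toList "##".toList) ")".toList))) ",".toList := by
          rcases List.mem_append.1 hp1 with hp2 | hp2
          · exact PySem.List.mem_of_mem_slice _ _ _ hp2
          · exact PySem.List.mem_of_mem_slice _ _ _ hp2
        rw [comma_eq, splitOn_eq_charSplit] at hpp
        exact h (PySem.List.mem_of_mem_slice _ _ _ (by simpa using mem_of_mem_charSplit hpp hxp))
      · subst hp1; simp at hxp
  · exact h (PySem.List.mem_of_mem_slice _ _ _ (by simpa using h1))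

theorem units_nl_free (im : List Char) (lines : List (List Char))
    (hl : ∀ l ∈ lines, '\n' ∉ l) :
    ∀ b, ∀ u ∈ unitsOf im b lines, '\n' ∉ u := by
  induction lines with
  | nil => intro b u hu; simp [unitsOf] at hu
  | cons a t ih =>
    intro b u hu
    rw [unitsOf] at hu
    rcases List.mem_append.1 hu with h1 | h1
    · unfold chunkOf at h1
      split at h1
      · rcases List.mem_cons.1 h1 with h2 | h2
        · exact h2 ▸ hl a List.mem_cons_self
        · exact notMem_of_mem_charSplit h2
      · split at h1
        · rcases List.mem_cons.1 h1 with h2 | h2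
          · exact h2 ▸ rotate_nl_free (hl a List.mem_cons_self)
          · simp at h2
        · rcases List.mem_cons.1 h1 with h2 | h2
          · exact h2 ▸ hl a List.mem_cons_self
          · simp at h2
    · exact ih (fun l hl' => hl l (List.mem_cons.2 (Or.inr hl'))) _ u h1

theorem changeDAO3_elim (s : String) :
    changeDAO3 s = String.ofList ((PySem.Chars.splitOn s.toList "\n".toList).foldl stepA3 []) := by
  conv_rhs => rw [← PySem.List.foldl_pyRange_zero_pyGetD' (PySem.Chars.splitOn s.toList "\n".toList) [] stepA3 []]
  rfl

theorem changeDAO3_units (ls : List (List Char)) (h : ∀ u ∈ ls, '\n' ∉ u) :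
    changeDAO3 (String.ofList (ls.flatMap (· ++ "\n".toList)))
      = String.ofList ((ls.flatMap emitOf).flatten ++ "\n".toList) := by
  rw [changeDAO3_elim]
  simp only [String.toList_ofList, nl_eq, splitOn_eq_charSplit]
  rw [charSplit_units h]
  rw [show (stepA3 : List Char → List Char → List Char)
        = fun fin a => fin ++ (emitOf a).flatten from funext fun fin => funext fun a => stepA3_eq fin a]
  rw [PySem.List.foldl_append_eq_flatMap]
  rw [flatten_flatMap_eq]
  simp [emitOf, show pvSuperFix [] = some [] from rfl]

theorem changeDAO2_elim (code className : String) :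
    changeDAO2 code className = changeDAO3 (String.ofList
      (((PySem.Chars.splitOn code.toList "\n".toList).foldl
        (stepA1 ("import DataAccessLayer.DataAccess.DTOs.DTOS.".toList ++ className.toList ++ "DTO;\n".toList))
        (PySem.Chars.isIn ("import DataAccessLayer.DataAccess.DTOs.DTOS.".toList ++ className.toList) code.toList, [])).2)) := by
  conv_rhs => rw [← PySem.List.foldl_pyRange_zero_pyGetD' (PySem.Chars.splitOn code.toList "\n".toList) []
    (stepA1 ("import DataAccessLayer.DataAccess.DTOs.DTOS.".toList ++ className.toList ++ "DTO;\n".toList))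
    (PySem.Chars.isIn ("import DataAccessLayer.DataAccess.DTOs.DTOS.".toList ++ className.toList) code.toList, [])]
  rfl

theorem changeDAO2_alt_elim (code className : String) :
    changeDAO2_alt code className = String.ofList (PySem.Chars.join []
      ((((PySem.Chars.splitOn code.toList "\n".toList).foldl
        (stepB ("import DataAccessLayer.DataAccess.DTOs.DTOS.".toList ++ className.toList ++ "DTO;".toList))
        (PySem.Chars.isIn ("import DataAccessLayer.DataAccess.DTOs.DTOS.".toList ++ className.toList) code.toList, [])).2) ++ ["\n".toList])) := rfl

theorem main_eq (code className : String) : changeDAO2 code className = changeDAO2_alt code className := by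
  rw [changeDAO2_elim, changeDAO2_alt_elim]
  have him : "import DataAccessLayer.DataAccess.DTOs.DTOS.".toList ++ className.toList ++ "DTO;\n".toList
      = ("import DataAccessLayer.DataAccess.DTOs.DTOS.".toList ++ className.toList ++ "DTO;".toList) ++ "\n".toList := by
    rw [show ("DTO;\n".toList : List Char) = "DTO;".toList ++ "\n".toList from rfl]
    simp [List.append_assoc]
  rw [him]
  have hl : ∀ l ∈ PySem.Chars.splitOn code.toList "\n".toList, '\n' ∉ l := by
    intro l hmem
    rw [nl_eq, splitOn_eq_charSplit] at hmem
    exact notMem_of_mem_charSplit hmem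
  rw [foldA1_eq, foldB_eq]
  rw [show ((finalIm _ _ _, [] ++ (unitsOf ("import DataAccessLayer.DataAccess.DTOs.DTOS.".toList ++ className.toList ++ "DTO;".toList)
      (PySem.Chars.isIn ("import DataAccessLayer.DataAccess.DTOs.DTOS.".toList ++ className.toList) code.toList)
      (PySem.Chars.splitOn code.toList "\n".toList)).flatMap (· ++ "\n".toList)) :
      Bool × List Char).2
    = (unitsOf ("import DataAccessLayer.DataAccess.DTOs.DTOS.".toList ++ className.toList ++ "DTO;".toList)
      (PySem.Chars.isIn ("import DataAccessLayer.DataAccess.DTOs.DTOS.".toList ++ className.toList) code.toList)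
      (PySem.Chars.splitOn code.toList "\n".toList)).flatMap (· ++ "\n".toList) from by simp]
  rw [changeDAO3_units _ (units_nl_free _ _ hl _)]
  unfold PySem.Chars.join
  rw [intercalate_nil_eq_flatten]
  simp [List.flatten_append]

-- ===== VERDICT (by name: the statement is the Claim_ definition above) =====
theorem changeDAO2_spec : Claim_equal_changeDAO2 := by
  intro code className _ _
  unfold Spec_changeDAO2
  exact main_eq code className
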